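-- pv_equiv track=rewrite | github.com/zouharvi/formal-bpe | formal_bpe/model_slow_yield.py | token_dictionary
-- ===== SOURCE A (Python) =====
-- from typing import Dict, List, Tuple
--
-- def token_dictionary(tokens) -> Tuple[List, Dict[int, Tuple[str, int]]]:
--     tokens_dict = {}
--     tokens_freqs = {}
--     tokens_ids = []
--     # first id is 1 (reserve 0 for something else)
--     i = 1
--     for line in tokens:
--         token_ids_line = []
--         for token in line:
--             if token not in tokens_dict:
--                 tokens_dict[token] = i
--                 tokens_freqs[i] = [token, 0]
--                 token_id = i
--                 i += 1
--             else:
--                 token_id = tokens_dict[token]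
--
--             tokens_freqs[token_id][1] += 1
--             token_ids_line.append(token_id)
--
--         tokens_ids.append(token_ids_line)
--
--     return tokens_ids, tokens_freqs
-- ===== SOURCE B (Python) =====
-- def token_dictionary(tokens):
--     # Pass 1: assign ids on first appearance (next id = current dict size + 1)
--     # and build the id lists.
--     tokens_dict = {}
--     tokens_ids = []
--     for line in tokens:
--         ids = []
--         for token in line:
--             if token not in tokens_dict:
--                 tokens_dict[token] = len(tokens_dict) + 1
--             ids.append(tokens_dict[token])
--         tokens_ids.append(ids)
--     # Pass 2: count occurrences per id over the built id lists.
--     counts = {}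
--     for ids in tokens_ids:
--         for tid in ids:
--             counts[tid] = counts.get(tid, 0) + 1
--     tokens_freqs = {tid: [token, counts.get(tid, 0)] for token, tid in tokens_dict.items()}
--     return tokens_ids, tokens_freqs
-- ===== Notes on version B (the rewrite author's own statement) =====
-- stated objective: alternative
-- what changed: B replaces A's single entangled pass (explicit id counter, freq dict updated in place per token) by two passes: pass 1 assigns ids using the dict size as the counter and builds the id lists only; pass 2 counts occurrences over the built id lists and the freq table is produced once by a comprehension over the id dict.
import Mathlib
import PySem

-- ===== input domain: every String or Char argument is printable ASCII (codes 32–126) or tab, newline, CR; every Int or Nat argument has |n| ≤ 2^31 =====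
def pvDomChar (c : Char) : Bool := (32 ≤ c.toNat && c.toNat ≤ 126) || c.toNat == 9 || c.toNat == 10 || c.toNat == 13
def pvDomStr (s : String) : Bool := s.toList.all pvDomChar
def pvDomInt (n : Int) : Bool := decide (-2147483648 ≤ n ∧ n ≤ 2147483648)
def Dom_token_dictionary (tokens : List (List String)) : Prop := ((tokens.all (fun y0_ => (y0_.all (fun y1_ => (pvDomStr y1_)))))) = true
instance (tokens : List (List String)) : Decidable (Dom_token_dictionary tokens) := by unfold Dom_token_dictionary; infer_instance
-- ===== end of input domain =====

-- B re-decomposes A's single entangled pass into: pass 1 assigns ids (dict size as counter)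
-- and builds the id lists; pass 2 counts over the built id lists; objective: alternative.

-- ===== PORT A =====
-- inner loop body of A: per-token step over state (tokens_dict, tokens_freqs, token_ids_line, i)
def pvAstep (s : PySem.Dict String Int × PySem.Dict Int (String × Int) × List Int × Int)
    (token : String) : PySem.Dict String Int × PySem.Dict Int (String × Int) × List Int × Int :=
  let (td, tf, line, i) := s
  if td.contains token = false then
    let td' := td.insert token i
    let tf' := tf.insert i (token, 0)
    let tid := i
    (td', tf'.modify tid ("", 0) (fun p => (p.1, p.2 + 1)), line ++ [tid], i + 1)
  else
    let tid := td.getD token 0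
    (td, tf.modify tid ("", 0) (fun p => (p.1, p.2 + 1)), line ++ [tid], i)

-- outer loop body of A: per-line step over state (tokens_dict, tokens_freqs, tokens_ids, i)
def pvAline (st : PySem.Dict String Int × PySem.Dict Int (String × Int) × List (List Int) × Int)
    (line : List String) : PySem.Dict String Int × PySem.Dict Int (String × Int) × List (List Int) × Int :=
  let r := line.foldl pvAstep (st.1, st.2.1, [], st.2.2.2)
  (r.1, r.2.1, st.2.2.1 ++ [r.2.2.1], r.2.2.2)

def token_dictionary (tokens : List (List String)) : List (List Int) × (List (Int × String × Int)) :=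
  let fin := tokens.foldl pvAline (PySem.Dict.empty, PySem.Dict.empty, [], 1)
  (fin.2.2.1, fin.2.1.items)

-- ===== PORT B =====
-- pass-1 inner body: assign id on first appearance (dict size + 1), emit the id
def pvBstep (s : PySem.Dict String Int × List Int) (token : String) :
    PySem.Dict String Int × List Int :=
  let td := if s.1.contains token then s.1 else s.1.insert token ((s.1.size : Int) + 1)
  (td, s.2 ++ [td.getD token 0])

-- pass-1 outer body
def pvBline (st : PySem.Dict String Int × List (List Int)) (line : List String) :
    PySem.Dict String Int × List (List Int) :=
  let r := line.foldl pvBstep (st.1, [])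
  (r.1, st.2 ++ [r.2])

-- pass-2 body: counts[tid] = counts.get(tid, 0) + 1
def pvBcount (c : PySem.Dict Int Int) (tid : Int) : PySem.Dict Int Int :=
  c.insert tid (c.getD tid 0 + 1)

def token_dictionary_alt (tokens : List (List String)) : List (List Int) × (List (Int × String × Int)) :=
  let p := tokens.foldl pvBline (PySem.Dict.empty, [])
  let counts := p.2.foldl (fun c ids => ids.foldl pvBcount c) PySem.Dict.empty
  (p.2, p.1.items.map (fun q => (q.2, q.1, counts.getD q.2 0)))

-- ===== PRECONDITION & SPEC =====
def Spec_token_dictionary (tokens : List (List String)) (out : List (List Int) × (List (Int × String × Int))) : Prop := out = token_dictionary_alt tokens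
instance (tokens : List (List String)) (out : List (List Int) × (List (Int × String × Int))) : Decidable (Spec_token_dictionary tokens out) := by unfold Spec_token_dictionary; infer_instance

-- ===== CLAIM (what is proved, stated in full; the proofs are below) =====
def Claim_equal_token_dictionary : Prop := ∀ (tokens : List (List String)), Dom_token_dictionary tokens → Spec_token_dictionary tokens (token_dictionary tokens)

-- ===== LEMMAS AND PROOFS =====

-- Invariant relating A's freq dict to the id dict and the ids emitted so far.
def pvInv (td : PySem.Dict String Int) (tf : PySem.Dict Int (String × Int)) (ids : List Int) : Prop :=
  tf.items = td.items.map (fun p => (p.2, p.1, (ids.count p.2 : Int)))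
  ∧ td.items.map Prod.snd = (List.range td.size).map (fun k : Nat => ((k : Int) + 1))
  ∧ ∀ x ∈ ids, 1 ≤ x ∧ x ≤ (td.size : Int)

lemma pvInv_bounds {td : PySem.Dict String Int} {tf ids} (h : pvInv td tf ids)
    {p : String × Int} (hp : p ∈ td.items) : 1 ≤ p.2 ∧ p.2 ≤ (td.size : Int) := by
  have : p.2 ∈ td.items.map Prod.snd := List.mem_map_of_mem hp
  rw [h.2.1] at this
  obtain ⟨k, hk, hke⟩ := List.mem_map.mp this
  have := List.mem_range.mp hk
  omega

lemma pvInv_vals_nodup {td : PySem.Dict String Int} {tf ids} (h : pvInv td tf ids) :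
    (td.items.map Prod.snd).Nodup := by
  rw [h.2.1]
  exact (List.nodup_range).map (fun a b hab => by omega)

theorem pv_step_eq (td : PySem.Dict String Int) (tf : PySem.Dict Int (String × Int))
    (ids acc : List Int) (token : String) (hInv : pvInv td tf ids) :
    ∃ td' tf' tid,
      pvAstep (td, tf, acc, (td.size : Int) + 1) token = (td', tf', acc ++ [tid], (td'.size : Int) + 1) ∧
      pvBstep (td, acc) token = (td', acc ++ [tid]) ∧
      pvInv td' tf' (ids ++ [tid]) := by
  have hbound : ∀ p ∈ td.items, 1 ≤ p.2 ∧ p.2 ≤ (td.size : Int) :=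
    fun p hp => pvInv_bounds hInv hp
  have hvnodup := pvInv_vals_nodup hInv
  obtain ⟨hTF, hVals, hIds⟩ := hInv
  by_cases h : td.contains token = true
  · -- token already present
    have hs : (td.items.find? (fun p => p.1 == token)).isSome := by
      rw [List.find?_isSome]
      simpa [PySem.Dict.contains, List.any_eq_true] using h
    obtain ⟨pr, hpr⟩ := Option.isSome_iff_exists.mp hs
    have hprmem := List.mem_of_find?_eq_some hpr
    have hprv := hbound pr hprmem
    have hget : td.getD token 0 = pr.2 := by
      simp [PySem.Dict.getD, PySem.Dict.get?, hpr]
    have hnotin : pr.2 ∉ ids → (ids.count pr.2) = 0 := fun hn => List.count_eq_zero.mpr hn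
    -- find? on td.items by value pr.2 returns pr (values are nodup)
    have hs2 : (td.items.find? (fun p => p.2 == pr.2)).isSome :=
      List.find?_isSome.mpr ⟨pr, hprmem, by simp⟩
    obtain ⟨q, hq⟩ := Option.isSome_iff_exists.mp hs2
    have hqmem := List.mem_of_find?_eq_some hq
    have hqv : q.2 = pr.2 := by simpa using List.find?_some hq
    have hqpr : q = pr := List.inj_on_of_nodup_map hvnodup hqmem hprmem hqv
    subst hqpr
    have hfindtf : tf.items.find? (fun r => r.1 == q.2)
        = some (q.2, (q.1, (ids.count q.2 : Int))) := by
      rw [hTF, List.find?_map,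
        show ((fun r : Int × String × Int => r.1 == q.2) ∘
            (fun p : String × Int => ((p.2 : Int), p.1, (ids.count p.2 : Int))))
          = (fun p : String × Int => p.2 == q.2) from rfl, hq]
      rfl
    have hconttf : tf.contains q.2 = true := by
      simp only [PySem.Dict.contains, List.any_eq_true]
      exact ⟨(q.2, (q.1, (ids.count q.2 : Int))), List.mem_of_find?_eq_some hfindtf, by simp⟩
    have hgetDtf : tf.getD q.2 ("", 0) = (q.1, (ids.count q.2 : Int)) := by
      simp [PySem.Dict.getD, PySem.Dict.get?, hfindtf]
    refine ⟨td, tf.modify q.2 ("", 0) (fun p => (p.1, p.2 + 1)), q.2, ?_, ?_, ?_, ?_, ?_⟩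
    · simp [pvAstep, h, hget]
    · simp [pvBstep, h, hget]
    · -- freq-table component of the invariant
      rw [PySem.Dict.modify, hgetDtf,
        PySem.Dict.items_insert_of_contains _ _ hconttf, hTF, List.map_map]
      refine List.map_congr_left (fun p hp => ?_)
      by_cases hpv : p.2 = q.2
      · have hpq : p = q := List.inj_on_of_nodup_map hvnodup hp hqmem hpv
        subst hpq
        simp [List.count_append]
      · simp [Function.comp, hpv, List.count_append, List.count_eq_zero]
    · exact hVals
    · intro x hx
      rcases List.mem_append.mp hx with hx | hx
      · exact hIds x hx
      · simp only [List.mem_singleton] at hx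
        subst hx; exact hprv
  · -- fresh token
    rw [Bool.not_eq_true] at h
    have hnotin_ids : ((td.size : Int) + 1) ∉ ids := fun hmem => by
      have := hIds _ hmem; omega
    have htfnc : tf.contains ((td.size : Int) + 1) = false := by
      simp only [PySem.Dict.contains]
      rw [List.any_eq_false]
      intro r hr
      rw [hTF] at hr
      obtain ⟨p, hp, rfl⟩ := List.mem_map.mp hr
      have := hbound p hp
      simp only [beq_iff_eq]
      omega
    have h2 : (tf.insert ((td.size : Int) + 1) (token, 0)).items
        = tf.items ++ [(((td.size : Int) + 1), (token, 0))] :=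
      PySem.Dict.items_insert_of_not_contains _ _ htfnc
    have hfindnone : tf.items.find? (fun r => r.1 == ((td.size : Int) + 1)) = none := by
      rw [List.find?_eq_none]
      intro r hr
      rw [hTF] at hr
      obtain ⟨p, hp, rfl⟩ := List.mem_map.mp hr
      have := hbound p hp
      simp only [beq_iff_eq]
      omega
    have hgetD2 : (tf.insert ((td.size : Int) + 1) (token, 0)).getD ((td.size : Int) + 1) ("", 0)
        = (token, 0) := by
      simp [PySem.Dict.getD, PySem.Dict.get?, h2, List.find?_append, hfindnone]
    have hcont2 : (tf.insert ((td.size : Int) + 1) (token, 0)).contains ((td.size : Int) + 1) = true := by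
      simp only [PySem.Dict.contains, List.any_eq_true]
      exact ⟨(((td.size : Int) + 1), (token, 0)), by rw [h2]; simp, by simp⟩
    have h3 : ((tf.insert ((td.size : Int) + 1) (token, 0)).modify ((td.size : Int) + 1) ("", 0)
          (fun p => (p.1, p.2 + 1))).items
        = tf.items ++ [(((td.size : Int) + 1), (token, 1))] := by
      rw [PySem.Dict.modify, hgetD2, PySem.Dict.items_insert_of_contains _ _ hcont2, h2,
        List.map_append]
      congr 1
      · conv_rhs => rw [← List.map_id tf.items]
        refine List.map_congr_left (fun r hr => ?_)
        rw [hTF] at hr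
        obtain ⟨p, hp, rfl⟩ := List.mem_map.mp hr
        have := hbound p hp
        have hne : ¬ ((p.2 : Int) = (td.size : Int) + 1) := by omega
        simp [hne]
      · simp
    have hsize : (td.insert token ((td.size : Int) + 1)).size = td.size + 1 := by
      rw [PySem.Dict.size_insert, if_neg (by simp [h])]
    have hitems : (td.insert token ((td.size : Int) + 1)).items
        = td.items ++ [(token, ((td.size : Int) + 1))] :=
      PySem.Dict.items_insert_of_not_contains _ _ h
    refine ⟨td.insert token ((td.size : Int) + 1),
      (tf.insert ((td.size : Int) + 1) (token, 0)).modify ((td.size : Int) + 1) ("", 0)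
        (fun p => (p.1, p.2 + 1)),
      ((td.size : Int) + 1), ?_, ?_, ?_, ?_, ?_⟩
    · simp only [pvAstep, h, if_pos]
      rw [hsize]
      push_cast
      ring_nf
    · simp [pvBstep, h, PySem.Dict.getD_insert_self]
    · rw [h3, hitems, List.map_append, hTF]
      congr 1
      · refine List.map_congr_left (fun p hp => ?_)
        have := hbound p hp
        have hne : (p.2 : Int) ≠ (td.size : Int) + 1 := by omega
        simp [List.count_append, List.count_eq_zero, hne]
      · simp [List.count_append, List.count_eq_zero.mpr hnotin_ids]
    · rw [hitems, List.map_append, hVals, hsize, List.range_succ, List.map_append]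
      simp
    · intro x hx
      rw [hsize]
      rcases List.mem_append.mp hx with hx | hx
      · have := hIds x hx; push_cast; omega
      · simp only [List.mem_singleton] at hx
        subst hx; push_cast; omega

theorem pv_line_eq (line : List String) (td : PySem.Dict String Int)
    (tf : PySem.Dict Int (String × Int)) (ids acc : List Int) (hInv : pvInv td tf ids) :
    ∃ td' tf' out,
      line.foldl pvAstep (td, tf, acc, (td.size : Int) + 1) = (td', tf', acc ++ out, (td'.size : Int) + 1) ∧
      line.foldl pvBstep (td, acc) = (td', acc ++ out) ∧
      pvInv td' tf' (ids ++ out) := by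
  induction line generalizing td tf ids acc with
  | nil => exact ⟨td, tf, [], by simp, by simp, by simpa using hInv⟩
  | cons t rest ih =>
    obtain ⟨td₁, tf₁, tid, hA, hB, hI⟩ := pv_step_eq td tf ids acc t hInv
    obtain ⟨td', tf', out, hA', hB', hI'⟩ := ih td₁ tf₁ (ids ++ [tid]) (acc ++ [tid]) hI
    exact ⟨td', tf', tid :: out, by simp [List.foldl_cons, hA, hA'],
      by simp [List.foldl_cons, hB, hB'], by simpa using hI'⟩

theorem pv_lines_eq (tokens : List (List String)) (td : PySem.Dict String Int)
    (tf : PySem.Dict Int (String × Int)) (tids : List (List Int))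
    (hInv : pvInv td tf tids.flatten) :
    ∃ td' tf' tids',
      tokens.foldl pvAline (td, tf, tids, (td.size : Int) + 1) = (td', tf', tids ++ tids', (td'.size : Int) + 1) ∧
      tokens.foldl pvBline (td, tids) = (td', tids ++ tids') ∧
      pvInv td' tf' ((tids ++ tids').flatten) := by
  induction tokens generalizing td tf tids with
  | nil => exact ⟨td, tf, [], by simp, by simp, by simpa using hInv⟩
  | cons line rest ih =>
    obtain ⟨td₁, tf₁, out, hA, hB, hI⟩ := pv_line_eq line td tf tids.flatten [] hInv
    have hI' : pvInv td₁ tf₁ (tids ++ [out]).flatten := by simpa using hI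
    obtain ⟨td', tf', tids', hA', hB', hI''⟩ := ih td₁ tf₁ (tids ++ [out]) hI'
    refine ⟨td', tf', out :: tids', ?_, ?_, by simpa using hI''⟩
    · simpa [List.foldl_cons, pvAline, hA, List.append_assoc] using hA'
    · simpa [List.foldl_cons, pvBline, hB, List.append_assoc] using hB'

lemma pvBcount_eq : pvBcount = fun (d : PySem.Dict Int Int) x => d.insert x (d.getD x 0 + 1) := rfl

-- ===== VERDICT (by name: the statement is the Claim_ definition above) =====
theorem token_dictionary_spec : Claim_equal_token_dictionary := by
  intro tokens _
  unfold Spec_token_dictionary token_dictionary token_dictionary_alt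
  have hInv0 : pvInv PySem.Dict.empty PySem.Dict.empty (List.flatten ([] : List (List Int))) := by
    refine ⟨rfl, rfl, by simp⟩
  obtain ⟨td', tf', tids', hA, hB, hI⟩ := pv_lines_eq tokens PySem.Dict.empty PySem.Dict.empty [] hInv0
  have h1 : ((PySem.Dict.empty : PySem.Dict String Int).size : Int) + 1 = 1 := rfl
  rw [← h1, hA, hB]
  simp only [List.nil_append]
  refine Prod.ext rfl ?_
  show tf'.items = _
  rw [hI.1]
  have hc : ∀ v : Int,
      (tids'.foldl (fun c ids => ids.foldl pvBcount c) PySem.Dict.empty).getD v 0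
        = (tids'.flatten.count v : Int) := by
    intro v
    rw [← List.foldl_flatten, pvBcount_eq, PySem.Dict.getD_foldl_insert_add_one]
    simp
  simp only [hc, List.nil_append]
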